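-- pv_equiv track=rewrite | github.com/jingof/Python-Coding-Projects | Section 2/BarracksChoice.py | Solution
-- ===== SOURCE A (Python) =====
-- def Solution(n,k):
--     barracks = [0]*k
--     options = 1
--     i = 0
--     while i < n:
--         minn = min(barracks)
--         counter = barracks.count(minn)
--         options *= counter
--         minInd = barracks.index(minn)
--         barracks[minInd] +=1
--         i+=1
--     return options
-- ===== SOURCE B (Python) =====
-- def Solution(n, k):
--     # closed form: product over i in range(n) of (k - i % k)
--     # = (k!)^(n//k) * k*(k-1)*...*(k-r+1) with q, r = divmod(n, k)
--     if n <= 0: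
--         return 1
--     q, r = divmod(n, k)
--     partial = 1
--     for j in range(r):
--         partial *= (k - j)
--     if q:
--         fact_k = 1
--         for j in range(1, k + 1):
--             fact_k *= j
--         return fact_k ** q * partial
--     return partial
-- ===== Notes on version B (the rewrite author's own statement) =====
-- stated objective: faster
-- what changed: B replaces A's n-step simulation of k barrack counters (each step scanning the list for min/count/index) by the closed form (k!)^(n//k) * k*(k-1)*...*(k-(n%k)+1), computed with two O(k) product loops and one exponentiation.
import Mathlib
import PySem

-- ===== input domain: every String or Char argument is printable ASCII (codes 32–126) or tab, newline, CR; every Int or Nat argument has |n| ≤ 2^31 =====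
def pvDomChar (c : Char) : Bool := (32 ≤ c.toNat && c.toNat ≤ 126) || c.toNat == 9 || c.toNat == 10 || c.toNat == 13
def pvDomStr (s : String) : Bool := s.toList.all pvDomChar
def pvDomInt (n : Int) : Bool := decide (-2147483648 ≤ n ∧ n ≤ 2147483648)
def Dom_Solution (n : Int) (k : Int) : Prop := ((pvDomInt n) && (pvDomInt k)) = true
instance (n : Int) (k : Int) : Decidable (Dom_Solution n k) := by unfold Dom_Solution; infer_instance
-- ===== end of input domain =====

-- B replaces A's O(n*k) simulation by the closed form (k!)^(n//k) * falling-factorial(k, n%k): asymptotically faster.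

-- ===== PORT A =====
-- while i < n: the loop body runs max(n,0) times; fuel = n.toNat counts the remaining iterations.
def SolutionLoopA (fuel : Nat) (barracks : List Int) (options : Int) : Int :=
  match fuel with
  | 0 => options
  | m + 1 =>
    match PySem.List.min? barracks (fun x => x) with
    | none => options          -- min([]) raises ValueError; excluded by Pre_Solution
    | some minn =>
      let counter : Int := (PySem.List.count barracks minn : Int)
      let options := options * counter
      match PySem.List.index? barracks minn with
      | none => options        -- unreachable: minn ∈ barracks
      | some minInd =>
        -- barracks[minInd] += 1 : read then write at a valid index
        SolutionLoopA m (barracks.set minInd (barracks.getD minInd 0 + 1)) options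

def Solution (n : Int) (k : Int) : Int :=
  SolutionLoopA n.toNat (PySem.List.pyRepeat [(0 : Int)] k) 1

-- ===== PORT B =====
def Solution_alt (n : Int) (k : Int) : Int :=
  if n ≤ 0 then 1
  else
    let q := PySem.Int.floordiv n k
    let r := PySem.Int.mod n k
    let part := (PySem.List.pyRange 0 r 1).foldl (fun acc j => acc * (k - j)) 1
    if q ≠ 0 then    -- 'if q:' — the k! loop is skipped when n < k
      let factk := (PySem.List.pyRange 1 (k + 1) 1).foldl (fun acc j => acc * j) 1
      factk ^ q.toNat * part    -- fact_k ** q with q = n//k ≥ 0 on the admitted inputs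
    else part

-- ===== PRECONDITION & SPEC =====
-- A raises ValueError (min of empty list) exactly when n > 0 and k ≤ 0; those inputs are excluded.
def Pre_Solution (n : Int) (k : Int) : Prop := 0 < n → 0 < k
instance (n : Int) (k : Int) : Decidable (Pre_Solution n k) := by unfold Pre_Solution; infer_instance
def pvWitness_Solution : Int × Int := (7, 3)
def Spec_Solution (n : Int) (k : Int) (out : Int) : Prop := out = Solution_alt n k
instance (n : Int) (k : Int) (out : Int) : Decidable (Spec_Solution n k out) := by unfold Spec_Solution; infer_instance

-- ===== CLAIM (what is proved, stated in full; the proofs are below) =====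
def Claim_equal_Solution : Prop := ∀ (n : Int) (k : Int), Dom_Solution n k → Pre_Solution n k → Spec_Solution n k (Solution n k)

-- ===== LEMMAS AND PROOFS =====

-- product of A's counters: P k K m r = product collected over m more steps when
-- r barracks already hold one extra soldier (0 ≤ r < K)
def loopProd (k : Int) (K : Nat) : Nat → Nat → Int
  | 0, _ => 1
  | m + 1, r => (k - r) * loopProd k K m (if r + 1 = K then 0 else r + 1)

-- falling factorial: PP k r m = (k-r)(k-r-1)⋯(k-r-m+1)
def fallProd (k : Int) (r : Nat) : Nat → Int
  | 0 => 1
  | m + 1 => fallProd k r m * (k - r - m)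

-- ascending factorial 1⋅2⋯K
def upProd : Nat → Int
  | 0 => 1
  | s + 1 => upProd s * ((s : Int) + 1)

theorem fallProd_succ_front (k : Int) (r m : Nat) :
    fallProd k r (m + 1) = (k - r) * fallProd k (r + 1) m := by
  induction m with
  | zero => simp [fallProd]
  | succ m ih =>
      have : fallProd k r (m + 1 + 1) = fallProd k r (m + 1) * (k - r - (m + 1)) := rfl
      rw [this, ih]
      have : fallProd k (r + 1) (m + 1) = fallProd k (r + 1) m * (k - (r + 1) - m) := rfl
      rw [this]; ring

theorem fallProd_eq_prod (k : Int) (r m : Nat) :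
    fallProd k r m = ∏ j ∈ Finset.range m, (k - r - j) := by
  induction m with
  | zero => simp [fallProd]
  | succ m ih => rw [Finset.prod_range_succ, ← ih]; rfl

theorem upProd_eq_prod (K : Nat) : upProd K = ∏ j ∈ Finset.range K, ((j : Int) + 1) := by
  induction K with
  | zero => simp [upProd]
  | succ m ih => rw [Finset.prod_range_succ, ← ih]; rfl

theorem upProd_eq_fallProd (K : Nat) : upProd K = fallProd (K : Int) 0 K := by
  rw [upProd_eq_prod, fallProd_eq_prod, ← Finset.prod_range_reflect]
  apply Finset.prod_congr rfl
  intro j hj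
  have hjK : j < K := Finset.mem_range.mp hj
  push_cast [Nat.cast_sub (by omega : 1 + j ≤ K)]
  ring_nf
  omega

-- the per-step multiplier inside one block
theorem loopProd_small (k : Int) (K : Nat) :
    ∀ m r, r < K → m + r ≤ K → loopProd k K m r = fallProd k r m := by
  intro m
  induction m with
  | zero => intro r _ _; rfl
  | succ m ih =>
      intro r hr hm
      by_cases hK : r + 1 = K
      · have hm0 : m = 0 := by omega
        subst hm0
        simp [loopProd, fallProd]
      · have : loopProd k K (m + 1) r = (k - r) * loopProd k K m (r + 1) := by
          simp [loopProd, hK]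
        rw [this, ih (r + 1) (by omega) (by omega), fallProd_succ_front]

theorem loopProd_block (k : Int) (K : Nat) :
    ∀ c r m, r < K → c = K - r → loopProd k K (c + m) r = fallProd k r c * loopProd k K m 0 := by
  intro c
  induction c with
  | zero => intro r m hr hc; omega
  | succ c ih =>
      intro r m hr hc
      by_cases hK : r + 1 = K
      · have hc0 : c = 0 := by omega
        subst hc0
        have : loopProd k K (1 + m) r = (k - r) * loopProd k K m 0 := by
          simp [show 1 + m = m + 1 from by omega, loopProd, hK]
        rw [this]
        simp [fallProd]
      · have : loopProd k K (c + 1 + m) r = (k - r) * loopProd k K (c + m) (r + 1) := by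
          simp [show c + 1 + m = (c + m) + 1 from by omega, loopProd, hK]
        rw [this, ih (r + 1) m (by omega) (by omega), fallProd_succ_front]
        ring

theorem loopProd_blocks (k : Int) (K : Nat) (hK : 0 < K) :
    ∀ q s, loopProd k K (q * K + s) 0 = (fallProd k 0 K) ^ q * loopProd k K s 0 := by
  intro q
  induction q with
  | zero => intro s; simp
  | succ q ih =>
      intro s
      have : (q + 1) * K + s = K + (q * K + s) := by ring
      rw [this, loopProd_block k K K 0 (q * K + s) hK (by omega), ih s]
      ring

-- concrete list facts about A's state  rep r (c+1) ++ rep (K-r) c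
theorem getD_rep_append (c v : Int) (r m : Nat) :
    (List.replicate r v ++ c :: List.replicate m c).getD r 0 = c := by
  induction r with
  | zero => rfl
  | succ r _ => simp

theorem set_rep_append (c v w : Int) (r m : Nat) :
    (List.replicate r v ++ c :: List.replicate m c).set r w
      = List.replicate r v ++ w :: List.replicate m c := by
  induction r with
  | zero => rfl
  | succ r _ => simp

theorem min?_state (c : Int) (r m : Nat) :
    PySem.List.min? (List.replicate r (c + 1) ++ c :: List.replicate m c) (fun x => x) = some c := by
  set xs := List.replicate r (c + 1) ++ c :: List.replicate m c with hxs
  have hne : xs ≠ [] := by simp [hxs]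
  obtain ⟨v, hv⟩ : ∃ v, PySem.List.min? xs (fun x => x) = some v := by
    cases h : PySem.List.min? xs (fun x => x) with
    | none => exact absurd ((PySem.List.min?_eq_none_iff _ _).mp h) hne
    | some v => exact ⟨v, rfl⟩
  have hmem := PySem.List.min?_mem hv
  have hmin := PySem.List.min?_isMin hv
  have hcx : c ∈ xs := by simp [hxs]
  have hvc : v ≤ c := hmin c hcx
  have : v = c + 1 ∨ v = c := by
    rcases List.mem_append.mp (hxs ▸ hmem) with h | h
    · exact Or.inl (List.eq_of_mem_replicate h)
    · rcases List.mem_cons.mp h with h | h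
      · exact Or.inr h
      · exact Or.inr (List.eq_of_mem_replicate h)
  rcases this with h | h
  · omega
  · rw [hv, h]

theorem count_state (c : Int) (r m : Nat) :
    PySem.List.count (List.replicate r (c + 1) ++ c :: List.replicate m c) c = m + 1 := by
  rw [PySem.List.count_eq]
  simp [List.count_replicate]

theorem index?_state (c : Int) (r m : Nat) :
    PySem.List.index? (List.replicate r (c + 1) ++ c :: List.replicate m c) c = some r := by
  rw [PySem.List.index?_eq_some_iff]
  exact ⟨List.replicate r (c + 1), List.replicate m c, rfl, by simp,
    fun h => by have := List.eq_of_mem_replicate h; omega⟩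

-- loop invariant: from state (rep r (c+1) ++ rep (K-r) c), A's loop multiplies opts by loopProd k K m r
theorem loopA_state (k : Int) (K : Nat) (hk : (K : Int) = k) :
    ∀ m r (c opts : Int), r < K →
      SolutionLoopA m (List.replicate r (c + 1) ++ List.replicate (K - r) c) opts
        = opts * loopProd k K m r := by
  intro m
  induction m with
  | zero => intro r c opts hr; simp [SolutionLoopA, loopProd]
  | succ m ih =>
      intro r c opts hr
      obtain ⟨m', hm'⟩ : ∃ m', K - r = m' + 1 := ⟨K - r - 1, by omega⟩
      have hsplit : List.replicate (K - r) c = c :: List.replicate m' c := by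
        rw [hm']; rfl
      rw [hsplit]
      rw [SolutionLoopA]
      simp only [min?_state c r m', count_state c r m', index?_state c r m',
          getD_rep_append c (c + 1) r m', set_rep_append c (c + 1) (c + 1) r m']
      have hstep : List.replicate r (c + 1) ++ (c + 1) :: List.replicate m' c
          = List.replicate (r + 1) (c + 1) ++ List.replicate (K - (r + 1)) c := by
        rw [show K - (r + 1) = m' from by omega,
            show r + 1 = r + 1 from rfl]
        simp [List.replicate_succ']
      rw [hstep]
      by_cases hK : r + 1 = K
      · have h0 : List.replicate (r + 1) (c + 1) ++ List.replicate (K - (r + 1)) c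
            = List.replicate 0 ((c + 1) + 1) ++ List.replicate (K - 0) (c + 1) := by
          simp [hK]
        rw [h0, ih 0 (c + 1) _ (by omega)]
        have hcnt : ((m' + 1 : Nat) : Int) = k - r := by omega
        simp only [loopProd, hK, if_true]
        rw [hcnt]; ring
      · rw [ih (r + 1) c _ (by omega)]
        have hcnt : ((m' + 1 : Nat) : Int) = k - r := by omega
        simp only [loopProd, if_neg hK]
        rw [hcnt]; ring

-- B's two product loops compute fallProd
theorem foldl_part (k : Int) : ∀ s : Nat,
    (PySem.List.pyRange 0 (s : Int) 1).foldl (fun acc j => acc * (k - j)) 1 = fallProd k 0 s := by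
  intro s
  induction s with
  | zero => simp [fallProd]
  | succ s ih =>
      have : ((s + 1 : Nat) : Int) = (s : Int) + 1 := by push_cast; ring
      rw [this, PySem.List.pyRange_one_succ_right (by omega), List.foldl_append, ih]
      simp [fallProd]

theorem foldl_fact : ∀ K : Nat,
    (PySem.List.pyRange 1 ((K : Int) + 1) 1).foldl (fun acc j => acc * j) 1 = upProd K := by
  intro K
  induction K with
  | zero => simp [PySem.List.pyRange_one_eq_nil, upProd]
  | succ s ih =>
      have : ((s + 1 : Nat) : Int) + 1 = ((s : Int) + 1) + 1 := by push_cast; ring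
      rw [this, PySem.List.pyRange_one_succ_right (by omega), List.foldl_append, ih]
      simp [upProd]

-- ===== VERDICT (by name: the statement is the Claim_ definition above) =====
theorem Solution_spec : Claim_equal_Solution := by
  intro n k _ hpre
  unfold Spec_Solution
  by_cases hn : n ≤ 0
  · have h0 : n.toNat = 0 := by omega
    simp [Solution, Solution_alt, h0, hn, SolutionLoopA]
  · have hn' : 0 < n := by omega
    have hk : 0 < k := hpre hn'
    set K := k.toNat with hKdef
    set N := n.toNat with hNdef
    have hkK : (K : Int) = k := Int.toNat_of_nonneg (by omega)
    have hnN : (N : Int) = n := Int.toNat_of_nonneg (by omega)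
    have hK0 : 0 < K := by omega
    -- A's side
    have hA : Solution n k = loopProd k K N 0 := by
      have hinit : PySem.List.pyRepeat [(0 : Int)] k = List.replicate K (0 : Int) := by
        rw [PySem.List.pyRepeat_singleton]
      have hstate : List.replicate K (0 : Int)
          = List.replicate 0 ((0 : Int) + 1) ++ List.replicate (K - 0) (0 : Int) := by simp
      rw [Solution, hinit, hstate, loopA_state k K hkK N 0 0 1 hK0, one_mul]
    -- B's side
    have hq : PySem.Int.floordiv n k = ((N / K : Nat) : Int) := by
      rw [← hnN, ← hkK]; exact PySem.Int.floordiv_natCast N K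
    have hr : PySem.Int.mod n k = ((N % K : Nat) : Int) := by
      rw [← hnN, ← hkK]; exact PySem.Int.mod_natCast N K
    have hB : Solution_alt n k
        = (upProd K) ^ (N / K) * fallProd k 0 (N % K) := by
      rw [Solution_alt, if_neg hn]
      simp only [hq, hr]
      by_cases hq0 : N / K = 0
      · rw [if_neg (by simp [hq0]), foldl_part k (N % K), hq0, pow_zero, one_mul]
      · have : ((N / K : Nat) : Int) ≠ 0 := by exact_mod_cast hq0
        rw [if_pos this, Int.toNat_natCast]
        congr 1
        · congr 1
          rw [← hkK]
          exact foldl_fact K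
        · exact foldl_part k (N % K)
    rw [hA, hB, upProd_eq_fallProd, hkK]
    have hNsplit : N = (N / K) * K + N % K := by
      have h1 := Nat.div_add_mod N K
      have h2 : K * (N / K) = (N / K) * K := Nat.mul_comm _ _
      omega
    rw [show loopProd k K N 0 = loopProd k K ((N / K) * K + N % K) 0 from by rw [← hNsplit]]
    rw [loopProd_blocks k K hK0,
        loopProd_small k K (N % K) 0 hK0 (by have := Nat.mod_lt N hK0; omega)]
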